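-- pv_equiv track=rewrite | github.com/boxingbeetle/apetest | src/apetest/robots.py | path_allowed
-- ===== SOURCE A (Python) =====
-- from collections.abc import Iterable, Iterator, Mapping
--
-- def path_allowed(path: str, rules: Iterable[tuple[bool, str]]) -> bool:
--     """
--     Checks whether the given rules allow visiting the given path.
--
--     @param path:
--         URL path component.
--         Must not contain percent-encoded values other than C{%2f} (C{/}).
--     @param rules:
--         Rules as returned by L{lookup_robots_rules}.
--     @return:
--         C{True} iff C{path} is allowed by C{rules}.
--     """
--
--     # The draft RFC specifies that the first match should be used,
--     # but both Google and Bing use the longest (most specific) match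
--     # instead. This means that in practice "longest match" will be
--     # used by sites, so we'll follow that.
--     result = True
--     longest = 0
--     for allow, prefix in rules:
--         if path.startswith(prefix) and len(prefix) > longest:
--             result = allow
--             longest = len(prefix)
--     return result
-- ===== SOURCE B (Python) =====
-- def path_allowed(path: str, rules) -> bool:
--     for allow, prefix in sorted(rules, key=lambda rule: len(rule[1]), reverse=True):
--         if prefix and path.startswith(prefix):
--             return allow
--     return True
-- ===== Notes on version B (the rewrite author's own statement) =====
-- stated objective: alternative
-- what changed: Replaced the single-pass running longest-prefix accumulator with a stable sort of the rules by descending prefix length followed by returning the allow flag of the first matching non-empty prefix.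
import Mathlib
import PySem

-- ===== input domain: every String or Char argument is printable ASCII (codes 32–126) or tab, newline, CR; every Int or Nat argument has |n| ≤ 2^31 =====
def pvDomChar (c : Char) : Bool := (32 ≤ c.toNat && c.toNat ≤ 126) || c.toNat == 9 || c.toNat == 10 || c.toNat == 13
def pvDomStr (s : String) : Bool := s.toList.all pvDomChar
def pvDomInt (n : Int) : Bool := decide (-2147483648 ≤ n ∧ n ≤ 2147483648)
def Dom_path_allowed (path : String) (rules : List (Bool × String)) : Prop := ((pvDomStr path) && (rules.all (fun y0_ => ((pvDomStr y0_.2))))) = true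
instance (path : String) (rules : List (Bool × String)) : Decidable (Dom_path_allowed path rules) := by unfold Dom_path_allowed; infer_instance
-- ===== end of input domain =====

set_option maxHeartbeats 1000000


-- B replaces A's running longest-match accumulator by a stable sort of the rules by
-- descending prefix length followed by a first-match scan (alternative algorithm, same cost class).

-- ===== PORT A =====
-- literal port of A's loop: state (result, longest), updated when the prefix matches and is strictly longer
def path_allowed (path : String) (rules : List (Bool × String)) : Bool :=
  (rules.foldl
    (fun st r =>
      if PySem.Str.startswith path r.2 && decide (PySem.Str.len r.2 > st.2) then
        (r.1, PySem.Str.len r.2)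
      else st)
    (true, (0 : Int))).1

-- ===== PORT B =====
-- the for-loop of Source B with its early return: first rule (in sorted order) whose prefix is truthy and matches
def pvFirstMatchB (path : String) : List (Bool × String) → Bool
  | [] => true
  | r :: rs =>
    if (PySem.Str.len r.2 != 0) && PySem.Str.startswith path r.2 then r.1
    else pvFirstMatchB path rs

def path_allowed_alt (path : String) (rules : List (Bool × String)) : Bool :=
  pvFirstMatchB path (PySem.List.sorted rules (fun rule => PySem.Str.len rule.2) true)

-- ===== PRECONDITION & SPEC =====
def Spec_path_allowed (path : String) (rules : List (Bool × String)) (out : Bool) : Prop := out = path_allowed_alt path rules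
instance (path : String) (rules : List (Bool × String)) (out : Bool) : Decidable (Spec_path_allowed path rules out) := by unfold Spec_path_allowed; infer_instance

-- ===== CLAIM (what is proved, stated in full; the proofs are below) =====
def Claim_equal_path_allowed : Prop := ∀ (path : String) (rules : List (Bool × String)), Dom_path_allowed path rules → Spec_path_allowed path rules (path_allowed path rules)

-- ===== LEMMAS AND PROOFS =====

-- first element of the list satisfying p, if any
def pvFM {α : Type} (p : α → Bool) : List α → Option α
  | [] => none
  | x :: xs => if p x then some x else pvFM p xs

-- the match predicate of B's scan
def pvMatch (path : String) (r : Bool × String) : Bool :=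
  (PySem.Str.len r.2 != 0) && PySem.Str.startswith path r.2

-- A's loop step
def pvStep (path : String) (st : Bool × Int) (r : Bool × String) : Bool × Int :=
  if PySem.Str.startswith path r.2 && decide (PySem.Str.len r.2 > st.2) then
    (r.1, PySem.Str.len r.2)
  else st

lemma pvFirstMatchB_eq_fm (path : String) (l : List (Bool × String)) :
    pvFirstMatchB path l = (match pvFM (pvMatch path) l with
      | none => true
      | some r => r.1) := by
  induction l with
  | nil => rfl
  | cons x xs ih =>
    show (if pvMatch path x then x.1 else pvFirstMatchB path xs) = _
    rw [pvFM]
    cases h : pvMatch path x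
    · rw [if_neg (by simp), if_neg (by simp), ih]
    · rw [if_pos rfl, if_pos rfl]

lemma pvFM_none_iff {α : Type} (p : α → Bool) (l : List α) :
    pvFM p l = none ↔ ∀ x ∈ l, p x = false := by
  induction l with
  | nil => simp [pvFM]
  | cons x xs ih =>
    by_cases h : p x = true
    · simp [pvFM, h]
    · simp only [Bool.not_eq_true] at h
      simp [pvFM, h, ih]

lemma pvFM_some_match {α : Type} {p : α → Bool} {l : List α} {r : α}
    (h : pvFM p l = some r) : p r = true ∧ r ∈ l := by
  induction l with
  | nil => simp [pvFM] at h
  | cons x xs ih =>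
    by_cases hx : p x = true
    · simp [pvFM, hx] at h; subst h; exact ⟨hx, List.mem_cons_self⟩
    · simp only [Bool.not_eq_true] at hx
      simp [pvFM, hx] at h
      rcases ih h with ⟨h1, h2⟩
      exact ⟨h1, List.mem_cons_of_mem _ h2⟩

-- in a descending-sorted list, the first match has the maximal key among matches
lemma pvFM_max {α : Type} {p : α → Bool} (key : α → Int) {l : List α} {r : α}
    (hp : l.Pairwise (fun a b => key b ≤ key a)) (h : pvFM p l = some r) :
    ∀ m ∈ l, p m = true → key m ≤ key r := by
  induction l with
  | nil => simp [pvFM] at h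
  | cons x xs ih =>
    rcases List.pairwise_cons.mp hp with ⟨hx, ht⟩
    by_cases hpx : p x = true
    · simp [pvFM, hpx] at h; subst h
      intro m hm _
      rcases List.mem_cons.mp hm with rfl | hm'
      · exact le_refl _
      · exact hx m hm'
    · simp only [Bool.not_eq_true] at hpx
      simp [pvFM, hpx] at h
      intro m hm hpm
      rcases List.mem_cons.mp hm with rfl | hm'
      · simp [hpx] at hpm
      · exact ih ht h m hm' hpm

-- inserting a non-matching element never changes the first match
lemma pvFM_insert_not {α : Type} {p : α → Bool} (bf : α → α → Bool) {x : α}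
    (hx : p x = false) (l : List α) :
    pvFM p (PySem.List.insertBy bf x l) = pvFM p l := by
  induction l with
  | nil => simp [PySem.List.insertBy, pvFM, hx]
  | cons a t ih =>
    simp only [PySem.List.insertBy]
    by_cases hb : bf x a = true
    · simp [hb, pvFM, hx]
    · simp only [Bool.not_eq_true] at hb
      by_cases hpa : p a = true
      · simp [hb, pvFM, hpa]
      · simp only [Bool.not_eq_true] at hpa
        simp [hb, pvFM, hpa, ih]

-- inserting a matching element whose key beats every matching element makes it the first match
lemma pvFM_insert_top {α : Type} {p : α → Bool} (key : α → Int) {x : α} {l : List α}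
    (hx : p x = true) (hall : ∀ m ∈ l, p m = true → key m < key x) :
    pvFM p (PySem.List.insertBy (fun a b => decide (key b < key a)) x l) = some x := by
  induction l with
  | nil => simp [PySem.List.insertBy, pvFM, hx]
  | cons a t ih =>
    simp only [PySem.List.insertBy]
    by_cases hb : decide (key a < key x) = true
    · simp [hb, pvFM, hx]
    · simp only [decide_eq_true_eq] at hb
      have hpa : p a = false := by
        by_contra hc
        simp only [Bool.not_eq_false] at hc
        exact hb (hall a List.mem_cons_self hc)
      simp only [decide_eq_true_eq, hb, if_false, pvFM, hpa, Bool.false_eq_true, if_false]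
      exact ih (fun m hm hpm => hall m (List.mem_cons_of_mem _ hm) hpm)

-- inserting an element whose key does not exceed the first match's key keeps that first match
lemma pvFM_insert_le {α : Type} {p : α → Bool} (key : α → Int) {x : α} {l : List α} {r : α}
    (hp : l.Pairwise (fun a b => key b ≤ key a)) (h : pvFM p l = some r)
    (hle : key x ≤ key r) :
    pvFM p (PySem.List.insertBy (fun a b => decide (key b < key a)) x l) = pvFM p l := by
  induction l with
  | nil => simp [pvFM] at h
  | cons a t ih =>
    rcases List.pairwise_cons.mp hp with ⟨ha, ht⟩
    simp only [PySem.List.insertBy]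
    have hb : ¬ (key a < key x) := by
      intro hlt
      by_cases hpa : p a = true
      · simp [pvFM, hpa] at h; subst h; omega
      · simp only [Bool.not_eq_true] at hpa
        simp [pvFM, hpa] at h
        have := (pvFM_some_match h).2
        have := ha r this
        omega
    simp only [decide_eq_true_eq, hb, if_false]
    by_cases hpa : p a = true
    · simp [pvFM, hpa]
    · simp only [Bool.not_eq_true] at hpa
      simp only [pvFM, hpa, Bool.false_eq_true, if_false]
      simp [pvFM, hpa] at h
      exact ih ht h

lemma pvSorted_append_single {α : Type} (key : α → Int) (l : List α) (x : α) :
    PySem.List.sorted (l ++ [x]) key true =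
      PySem.List.insertBy (fun a b => decide (key b < key a)) x
        (PySem.List.sorted l key true) := by
  rw [PySem.List.sorted_rev_eq_foldl_insertBy, PySem.List.sorted_rev_eq_foldl_insertBy,
    List.foldl_append]
  rfl

lemma pvStep_take {path : String} {st : Bool × Int} {r : Bool × String}
    (h1 : PySem.Str.startswith path r.2 = true) (h2 : st.2 < PySem.Str.len r.2) :
    pvStep path st r = (r.1, PySem.Str.len r.2) := by
  have hd : decide (PySem.Str.len r.2 > st.2) = true := decide_eq_true h2
  simp only [pvStep, h1, hd, Bool.and_self, if_true]

lemma pvStep_keep_short {path : String} {st : Bool × Int} {r : Bool × String}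
    (h2 : PySem.Str.len r.2 ≤ st.2) : pvStep path st r = st := by
  have hd : decide (PySem.Str.len r.2 > st.2) = false := decide_eq_false (by omega)
  simp only [pvStep, hd, Bool.and_false, Bool.false_eq_true, if_false]

lemma pvStep_keep_nosw {path : String} {st : Bool × Int} {r : Bool × String}
    (h1 : PySem.Str.startswith path r.2 = false) : pvStep path st r = st := by
  simp only [pvStep, h1, Bool.false_and, Bool.false_eq_true, if_false]

lemma pvLen_nonneg (s : String) : 0 ≤ PySem.Str.len s := by
  simp [PySem.Str.len_eq]

lemma pvMatch_key_pos {path : String} {r : Bool × String}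
    (h : pvMatch path r = true) : 0 < PySem.Str.len r.2 := by
  simp only [pvMatch, Bool.and_eq_true, bne_iff_ne, ne_eq] at h
  have := pvLen_nonneg r.2
  omega

-- main invariant: A's fold state corresponds to the first match of the sorted list
lemma pvMain (path : String) (rules : List (Bool × String)) :
    (pvFM (pvMatch path) (PySem.List.sorted rules (fun rule => PySem.Str.len rule.2) true) = none ∧
       rules.foldl (pvStep path) (true, (0 : Int)) = (true, 0)) ∨
    (∃ r, pvFM (pvMatch path) (PySem.List.sorted rules (fun rule => PySem.Str.len rule.2) true) = some r ∧
       (rules.foldl (pvStep path) (true, (0 : Int))).1 = r.1 ∧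
       (rules.foldl (pvStep path) (true, (0 : Int))).2 = PySem.Str.len r.2) := by
  induction rules using List.reverseRecOn with
  | nil =>
    left
    constructor
    · rfl
    · rfl
  | append_singleton l x ih =>
    have hsorted := PySem.List.sorted_pairwise_rev l (fun rule => PySem.Str.len rule.2)
    rw [List.foldl_append, pvSorted_append_single (fun rule => PySem.Str.len rule.2) l x]
    simp only [List.foldl_cons, List.foldl_nil]
    by_cases hmx : pvMatch path x = true
    · -- x matches (non-empty prefix of path)
      have hsw : PySem.Str.startswith path x.2 = true := by
        simp only [pvMatch, Bool.and_eq_true] at hmx; exact hmx.2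
      have hkx : 0 < PySem.Str.len x.2 := pvMatch_key_pos hmx
      rcases ih with ⟨hnone, hst0⟩ | ⟨r, hr, h1, h2⟩
      · -- no previous match: x becomes the result
        have hall : ∀ m ∈ PySem.List.sorted l (fun rule => PySem.Str.len rule.2) true,
            pvMatch path m = true → PySem.Str.len m.2 < PySem.Str.len x.2 := by
          intro m hm hpm
          have := (pvFM_none_iff (pvMatch path) _).mp hnone m hm
          rw [this] at hpm
          exact absurd hpm (by simp)
        have htop := pvFM_insert_top (p := pvMatch path) (x := x)
          (l := PySem.List.sorted l (fun rule => PySem.Str.len rule.2) true)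
          (fun rule => PySem.Str.len rule.2) hmx hall
        right
        refine ⟨x, htop, ?_, ?_⟩
        · rw [hst0, pvStep_take hsw (by exact hkx)]
        · rw [hst0, pvStep_take hsw (by exact hkx)]
      · by_cases hgt : PySem.Str.len r.2 < PySem.Str.len x.2
        · -- strictly longer: x wins
          have hall : ∀ m ∈ PySem.List.sorted l (fun rule => PySem.Str.len rule.2) true,
              pvMatch path m = true → PySem.Str.len m.2 < PySem.Str.len x.2 :=
            fun m hm hpm =>
              lt_of_le_of_lt
                (pvFM_max (p := pvMatch path) (r := r)
                  (l := PySem.List.sorted l (fun rule => PySem.Str.len rule.2) true)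
                  (fun rule => PySem.Str.len rule.2) hsorted hr m hm hpm) hgt
          have htop := pvFM_insert_top (p := pvMatch path) (x := x)
            (l := PySem.List.sorted l (fun rule => PySem.Str.len rule.2) true)
            (fun rule => PySem.Str.len rule.2) hmx hall
          right
          refine ⟨x, htop, ?_, ?_⟩
          · rw [pvStep_take hsw (by rw [h2]; exact hgt)]
          · rw [pvStep_take hsw (by rw [h2]; exact hgt)]
        · -- not longer: previous winner r stays
          rw [not_lt] at hgt
          have hkeep := pvStep_keep_short (path := path)
            (st := l.foldl (pvStep path) (true, (0 : Int))) (r := x) (by rw [h2]; exact hgt)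
          right
          refine ⟨r, ?_, ?_, ?_⟩
          · have hle := pvFM_insert_le (p := pvMatch path) (x := x) (r := r)
              (l := PySem.List.sorted l (fun rule => PySem.Str.len rule.2) true)
              (fun rule => PySem.Str.len rule.2) hsorted hr hgt
            rw [hle]
            exact hr
          · rw [hkeep]; exact h1
          · rw [hkeep]; exact h2
    · -- x does not match B's predicate: either startswith fails or prefix empty
      simp only [Bool.not_eq_true] at hmx
      have hstep : pvStep path (l.foldl (pvStep path) (true, (0 : Int))) x =
          l.foldl (pvStep path) (true, (0 : Int)) := by
        by_cases hsw : PySem.Str.startswith path x.2 = true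
        · have hk0 : PySem.Str.len x.2 = 0 := by
            simp only [pvMatch, hsw, Bool.and_true] at hmx
            simpa using hmx
          have hge : 0 ≤ (l.foldl (pvStep path) (true, (0 : Int))).2 := by
            rcases ih with ⟨_, hst0⟩ | ⟨r, _, _, h2⟩
            · rw [hst0]
            · rw [h2]; exact pvLen_nonneg r.2
          exact pvStep_keep_short (by omega)
        · simp only [Bool.not_eq_true] at hsw
          exact pvStep_keep_nosw hsw
      have hnotins := pvFM_insert_not (p := pvMatch path) (x := x)
        (fun a b => decide (PySem.Str.len b.2 < PySem.Str.len a.2)) hmx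
        (PySem.List.sorted l (fun rule => PySem.Str.len rule.2) true)
      rw [hstep, hnotins]
      exact ih

-- ===== VERDICT (by name: the statement is the Claim_ definition above) =====
theorem path_allowed_spec : Claim_equal_path_allowed := by
  intro path rules _
  unfold Spec_path_allowed path_allowed path_allowed_alt
  rw [pvFirstMatchB_eq_fm]
  have hmain := pvMain path rules
  have hstep : (fun (st : Bool × Int) (r : Bool × String) =>
      if PySem.Str.startswith path r.2 && decide (PySem.Str.len r.2 > st.2) then
        (r.1, PySem.Str.len r.2)
      else st) = pvStep path := by
    funext st r; rfl
  rw [hstep]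
  rcases hmain with ⟨hnone, hst⟩ | ⟨r, hr, h1, _⟩
  · rw [hnone, hst]
  · rw [hr, h1]
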